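-- pv_equiv track=rewrite | github.com/noahostle/SPEAR | Attacks/full_key_recovery/test_state_recovery.py | sampled_diff_score_from_values
-- ===== SOURCE A (Python) =====
-- from typing import Dict, List, Optional, Sequence, Tuple
--
-- def sampled_diff_score_from_values(values: Dict[int, int], diffs: Sequence[int], sample_x: Sequence[int]) -> int:
--     total = 0
--     for diff in diffs:
--         counts: Dict[int, int] = {}
--         for x in sample_x:
--             out_diff = (values[(x + diff) & 0xFFFF] - values[x]) & 0xFFFF
--             counts[out_diff] = counts.get(out_diff, 0) + 1
--         total += max(counts.values())
--     return total
-- ===== SOURCE B (Python) =====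
-- def sampled_diff_score_from_values(values, diffs, sample_x):
--     total = 0
--     for diff in diffs:
--         outs = sorted((values[(x + diff) & 0xFFFF] - values[x]) & 0xFFFF for x in sample_x)
--         runs = []
--         prev = None
--         cur = 0
--         for o in outs:
--             if prev is not None and o == prev:
--                 cur += 1
--             else:
--                 prev = o
--                 cur = 1
--             runs.append(cur)
--         total += max(runs)
--     return total
-- ===== Notes on version B (the rewrite author's own statement) =====
-- stated objective: alternative
-- what changed: Per diff, B builds the list of masked output differences, sorts it, and finds the mode size by a single linear scan over runs of equal adjacent values, replacing A's hash-map frequency counting and max over dict values.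
import Mathlib
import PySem

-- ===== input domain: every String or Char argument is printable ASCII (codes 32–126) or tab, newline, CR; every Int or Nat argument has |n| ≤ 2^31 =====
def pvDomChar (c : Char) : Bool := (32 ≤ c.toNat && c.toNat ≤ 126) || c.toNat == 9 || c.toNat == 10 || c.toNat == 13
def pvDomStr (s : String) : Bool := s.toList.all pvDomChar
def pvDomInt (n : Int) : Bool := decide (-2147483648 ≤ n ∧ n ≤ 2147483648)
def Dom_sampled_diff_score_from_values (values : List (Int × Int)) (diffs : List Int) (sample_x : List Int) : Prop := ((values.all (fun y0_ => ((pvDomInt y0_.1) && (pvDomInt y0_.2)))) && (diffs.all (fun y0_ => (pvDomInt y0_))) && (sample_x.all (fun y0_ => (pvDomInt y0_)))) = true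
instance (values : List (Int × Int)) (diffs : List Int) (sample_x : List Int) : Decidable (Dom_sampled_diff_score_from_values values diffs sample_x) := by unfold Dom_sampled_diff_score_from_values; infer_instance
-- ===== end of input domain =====

-- B replaces A's per-diff hash-map frequency count by sort-then-longest-run (alternative algorithm, not claimed faster).
-- values[k]: first-match association-list lookup (the dict argument); the 0 default is only reached outside Pre_ (KeyError inputs)
def pvLookup (values : List (Int × Int)) (k : Int) : Int :=
  ((values.find? (fun p => p.1 == k)).map Prod.snd).getD 0

-- ===== PORT A =====
def sampled_diff_score_from_values (values : List (Int × Int)) (diffs : List Int) (sample_x : List Int) : Int :=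
  diffs.foldl (fun total diff =>
    let counts : PySem.Dict Int Int :=
      sample_x.foldl (fun counts x =>
        let out_diff := PySem.Int.band (pvLookup values (PySem.Int.band (x + diff) 65535) - pvLookup values x) 65535
        counts.insert out_diff (counts.getD out_diff 0 + 1)) PySem.Dict.empty
    -- max(counts.values()): .getD 0 is only reached outside Pre_ (empty sample_x raises ValueError)
    total + (PySem.List.max? counts.values (fun v => v)).getD 0) 0

-- ===== PORT B =====
def sampled_diff_score_from_values_alt (values : List (Int × Int)) (diffs : List Int) (sample_x : List Int) : Int :=
  diffs.foldl (fun total diff =>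
    let outs := PySem.List.sorted (sample_x.map (fun x =>
      PySem.Int.band (pvLookup values (PySem.Int.band (x + diff) 65535) - pvLookup values x) 65535)) (fun v => v) false
    let fin := outs.foldl (fun (st : Option Int × Int × List Int) o =>
      match st.1 with
      | some p => if o = p then (some p, st.2.1 + 1, st.2.2 ++ [st.2.1 + 1])
                  else (some o, 1, st.2.2 ++ [(1 : Int)])
      | none => (some o, 1, st.2.2 ++ [(1 : Int)])) (none, 0, [])
    -- max(runs): .getD 0 is only reached outside Pre_ (empty sample_x raises ValueError)
    total + (PySem.List.max? fin.2.2 (fun v => v)).getD 0) 0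

-- ===== PRECONDITION & SPEC =====
-- Pre_ excludes exactly the inputs where Python A raises: a KeyError (some needed key missing
-- from values) or the ValueError of max() on no values (nonempty diffs with empty sample_x).
def Pre_sampled_diff_score_from_values (values : List (Int × Int)) (diffs : List Int) (sample_x : List Int) : Prop :=
  (diffs = [] ∨ sample_x ≠ []) ∧
  ∀ diff ∈ diffs, ∀ x ∈ sample_x,
    (values.find? (fun p => p.1 == x)).isSome ∧
    (values.find? (fun p => p.1 == PySem.Int.band (x + diff) 65535)).isSome
instance (values : List (Int × Int)) (diffs : List Int) (sample_x : List Int) : Decidable (Pre_sampled_diff_score_from_values values diffs sample_x) := by unfold Pre_sampled_diff_score_from_values; infer_instance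

def pvWitness_sampled_diff_score_from_values : (List (Int × Int)) × List Int × List Int :=
  ([(0, 7), (1, 9)], [1], [0])

def Spec_sampled_diff_score_from_values (values : List (Int × Int)) (diffs : List Int) (sample_x : List Int) (out : Int) : Prop := out = sampled_diff_score_from_values_alt values diffs sample_x
instance (values : List (Int × Int)) (diffs : List Int) (sample_x : List Int) (out : Int) : Decidable (Spec_sampled_diff_score_from_values values diffs sample_x out) := by unfold Spec_sampled_diff_score_from_values; infer_instance

-- ===== CLAIM (what is proved, stated in full; the proofs are below) =====
def Claim_equal_sampled_diff_score_from_values : Prop := ∀ (values : List (Int × Int)) (diffs : List Int) (sample_x : List Int), Dom_sampled_diff_score_from_values values diffs sample_x → Pre_sampled_diff_score_from_values values diffs sample_x → Spec_sampled_diff_score_from_values values diffs sample_x (sampled_diff_score_from_values values diffs sample_x)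

-- ===== LEMMAS AND PROOFS =====

-- the per-x output difference both programs compute
def pvOut (values : List (Int × Int)) (diff x : Int) : Int :=
  PySem.Int.band (pvLookup values (PySem.Int.band (x + diff) 65535) - pvLookup values x) 65535

-- running max with base 0 (the value of max() on the lists at hand, whose entries are ≥ 1)
def pvMax0 (l : List Int) : Int := l.foldl max 0

theorem pvFoldlMax_assoc (l : List Int) (a b : Int) :
    l.foldl max (max a b) = max a (l.foldl max b) := by
  induction l generalizing b with
  | nil => rfl
  | cons x t ih => simp only [List.foldl_cons, max_assoc, ih]

theorem pvMax0_cons (x : Int) (l : List Int) : pvMax0 (x :: l) = max x (pvMax0 l) := by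
  simp only [pvMax0, List.foldl_cons]
  rw [max_comm 0 x, pvFoldlMax_assoc]

theorem pvMax0_nonneg (l : List Int) : 0 ≤ pvMax0 l := by
  induction l with
  | nil => simp [pvMax0]
  | cons x t ih => rw [pvMax0_cons]; exact le_trans ih (le_max_right _ _)

theorem le_pvMax0_of_mem {x : Int} {l : List Int} (h : x ∈ l) : x ≤ pvMax0 l := by
  induction l with
  | nil => cases h
  | cons y t ih =>
    rw [pvMax0_cons]
    rcases List.mem_cons.mp h with h | h
    · exact h ▸ le_max_left _ _
    · exact le_trans (ih h) (le_max_right _ _)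

theorem pvMax0_le {l : List Int} {c : Int} (h0 : 0 ≤ c) (h : ∀ x ∈ l, x ≤ c) : pvMax0 l ≤ c := by
  induction l with
  | nil => simpa [pvMax0]
  | cons y t ih =>
    rw [pvMax0_cons]
    exact max_le (h y (List.mem_cons_self)) (ih fun x hx => h x (List.mem_cons_of_mem _ hx))

theorem pvMax0_eq_of_mem_iff {l₁ l₂ : List Int} (h : ∀ x, x ∈ l₁ ↔ x ∈ l₂) :
    pvMax0 l₁ = pvMax0 l₂ := by
  apply le_antisymm
  · exact pvMax0_le (pvMax0_nonneg _) fun x hx => le_pvMax0_of_mem ((h x).mp hx)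
  · exact pvMax0_le (pvMax0_nonneg _) fun x hx => le_pvMax0_of_mem ((h x).mpr hx)

theorem pvMaxD_eq_pvMax0 {l : List Int} (h : ∀ x ∈ l, (1 : Int) ≤ x) :
    (PySem.List.max? l (fun v => v)).getD 0 = pvMax0 l := by
  cases l with
  | nil => rfl
  | cons x t =>
    rw [PySem.List.max?_id_cons]
    have hx : max 0 x = x := max_eq_right (le_trans zero_le_one (h x List.mem_cons_self))
    simp only [Option.getD_some, pvMax0, List.foldl_cons, hx]

-- B's run-length scan, as structural recursion (state: previous value, current run length)
def pvR (p c : Int) : List Int → List Int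
  | [] => []
  | o :: t => if o = p then (c + 1) :: pvR p (c + 1) t else 1 :: pvR o 1 t

def pvRunsTop : List Int → List Int
  | [] => []
  | o :: t => 1 :: pvR o 1 t

-- port B's foldl produces exactly pvR / pvRunsTop
theorem pvFold_runs_some (s : List Int) (p c : Int) (acc : List Int) :
    (s.foldl (fun (st : Option Int × Int × List Int) o =>
      match st.1 with
      | some q => if o = q then (some q, st.2.1 + 1, st.2.2 ++ [st.2.1 + 1])
                  else (some o, 1, st.2.2 ++ [(1 : Int)])
      | none => (some o, 1, st.2.2 ++ [(1 : Int)])) (some p, c, acc)).2.2 = acc ++ pvR p c s := by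
  induction s generalizing p c acc with
  | nil => simp [pvR]
  | cons o t ih =>
    simp only [List.foldl_cons]
    by_cases h : o = p
    · subst h
      rw [pvR]
      simp only [if_pos]
      rw [ih]; simp
    · rw [pvR]
      simp only [if_neg h]
      rw [ih]; simp

theorem pvFold_runs (s : List Int) :
    (s.foldl (fun (st : Option Int × Int × List Int) o =>
      match st.1 with
      | some q => if o = q then (some q, st.2.1 + 1, st.2.2 ++ [st.2.1 + 1])
                  else (some o, 1, st.2.2 ++ [(1 : Int)])
      | none => (some o, 1, st.2.2 ++ [(1 : Int)])) (none, 0, [])).2.2 = pvRunsTop s := by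
  cases s with
  | nil => rfl
  | cons o t =>
    simp only [List.foldl_cons, pvRunsTop]
    rw [pvFold_runs_some]
    simp

theorem pvR_entries_ge_one {s : List Int} {p c : Int} (hc : 0 ≤ c) :
    ∀ x ∈ pvR p c s, (1 : Int) ≤ x := by
  induction s generalizing p c with
  | nil => intro x hx; cases hx
  | cons o t ih =>
    intro x hx
    by_cases h : o = p
    · rw [pvR, if_pos h] at hx
      rcases List.mem_cons.mp hx with h' | h'
      · omega
      · exact ih (by omega) x h'
    · rw [pvR, if_neg h] at hx
      rcases List.mem_cons.mp hx with h' | h'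
      · omega
      · exact ih (by omega) x h'

theorem pvRunsTop_entries_ge_one {s : List Int} : ∀ x ∈ pvRunsTop s, (1 : Int) ≤ x := by
  cases s with
  | nil => intro x hx; cases hx
  | cons o t =>
    intro x hx
    rcases List.mem_cons.mp hx with h' | h'
    · omega
    · exact pvR_entries_ge_one (by omega) x h'

-- the key lemma: on a ≤-sorted list, the max run length starting from state (p, c)
-- is the max over elements of (their total count, plus c for the continuing block of p)
theorem pvR_max (s : List Int) (hs : s.Pairwise (· ≤ ·)) (p c : Int) (hp : ∀ y ∈ s, p ≤ y) :
    pvMax0 (pvR p c s) =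
    pvMax0 (s.map (fun v => if v = p then c + (s.count v : Int) else (s.count v : Int))) := by
  induction s generalizing p c with
  | nil => rfl
  | cons o t ih =>
    have hpair := (List.pairwise_cons.mp hs).1
    have ht := (List.pairwise_cons.mp hs).2
    by_cases h : o = p
    · subst h
      rw [pvR, if_pos rfl]
      have ihe := ih ht o (c + 1) hpair
      rw [pvMax0_cons, ihe]
      simp only [List.map_cons, List.count_cons_self]
      rw [pvMax0_cons]
      have hmapeq : (t.map (fun v => if v = o then c + ((o :: t).count v : Int) else ((o :: t).count v : Int)))
          = t.map (fun v => if v = o then c + 1 + (t.count v : Int) else (t.count v : Int)) := by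
        apply List.map_congr_left
        intro v hv
        by_cases hvo : v = o
        · subst hvo; simp [List.count_cons_self]; ring
        · simp [hvo, List.count_cons_of_ne (fun hh => hvo hh.symm)]
      rw [hmapeq]
      by_cases hcnt : t.count o = 0
      · rw [hcnt]; push_cast; ring_nf
      · have hmem : o ∈ t := List.count_pos_iff.mp (Nat.pos_of_ne_zero hcnt)
        have hin : c + 1 + (t.count o : Int) ∈ t.map (fun v => if v = o then c + 1 + (t.count v : Int) else (t.count v : Int)) := by
          exact List.mem_map.mpr ⟨o, hmem, by simp⟩
        have hle := le_pvMax0_of_mem hin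
        have h1 : (1 : Int) ≤ (t.count o : Int) := by exact_mod_cast Nat.one_le_iff_ne_zero.mpr hcnt
        rw [max_eq_right (by omega), max_eq_right (by push_cast; omega)]
    · -- fresh block: p never occurs in o :: t
      have hpo : p < o := lt_of_le_of_ne (hp o List.mem_cons_self) (fun hh => h hh.symm)
      have hnot : ∀ v ∈ o :: t, v ≠ p := by
        intro v hv
        rcases List.mem_cons.mp hv with h' | h'
        · subst h'; omega
        · have := hpair v h'; omega
      rw [pvR, if_neg h, pvMax0_cons]
      have ihe := ih ht o 1 hpair
      rw [ihe]
      have hmapeq : ((o :: t).map (fun v => if v = p then c + ((o :: t).count v : Int) else ((o :: t).count v : Int)))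
          = (o :: t).map (fun v => ((o :: t).count v : Int)) := by
        apply List.map_congr_left
        intro v hv
        simp [hnot v hv]
      rw [hmapeq]
      simp only [List.map_cons, List.count_cons_self]
      rw [pvMax0_cons]
      have hmapeq2 : (t.map (fun v => ((o :: t).count v : Int)))
          = t.map (fun v => if v = o then 1 + (t.count v : Int) else (t.count v : Int)) := by
        apply List.map_congr_left
        intro v hv
        by_cases hvo : v = o
        · subst hvo; simp [List.count_cons_self]; ring
        · simp [hvo, List.count_cons_of_ne (fun hh => hvo hh.symm)]
      rw [hmapeq2]
      by_cases hcnt : t.count o = 0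
      · rw [hcnt]; push_cast; ring_nf
      · have hmem : o ∈ t := List.count_pos_iff.mp (Nat.pos_of_ne_zero hcnt)
        have hin : (1 : Int) + (t.count o : Int) ∈ t.map (fun v => if v = o then 1 + (t.count v : Int) else (t.count v : Int)) :=
          List.mem_map.mpr ⟨o, hmem, by simp⟩
        have hle := le_pvMax0_of_mem hin
        have h1 : (1 : Int) ≤ (t.count o : Int) := by exact_mod_cast Nat.one_le_iff_ne_zero.mpr hcnt
        rw [max_eq_right (by omega), max_eq_right (by push_cast; omega)]

theorem pvRunsTop_max (s : List Int) (hs : s.Pairwise (· ≤ ·)) :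
    pvMax0 (pvRunsTop s) = pvMax0 (s.map (fun v => (s.count v : Int))) := by
  cases s with
  | nil => rfl
  | cons o t =>
    have hpair := (List.pairwise_cons.mp hs).1
    have ht := (List.pairwise_cons.mp hs).2
    rw [pvRunsTop, pvMax0_cons, pvR_max t ht o 1 hpair]
    simp only [List.map_cons, List.count_cons_self]
    rw [pvMax0_cons]
    have hmapeq2 : (t.map (fun v => ((o :: t).count v : Int)))
        = t.map (fun v => if v = o then 1 + (t.count v : Int) else (t.count v : Int)) := by
      apply List.map_congr_left
      intro v hv
      by_cases hvo : v = o
      · subst hvo; simp [List.count_cons_self]; ring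
      · simp [hvo, List.count_cons_of_ne (fun hh => hvo hh.symm)]
    rw [hmapeq2]
    by_cases hcnt : t.count o = 0
    · rw [hcnt]; push_cast; ring_nf
    · have hmem : o ∈ t := List.count_pos_iff.mp (Nat.pos_of_ne_zero hcnt)
      have hin : (1 : Int) + (t.count o : Int) ∈ t.map (fun v => if v = o then 1 + (t.count v : Int) else (t.count v : Int)) :=
        List.mem_map.mpr ⟨o, hmem, by simp⟩
      have hle := le_pvMax0_of_mem hin
      have h1 : (1 : Int) ≤ (t.count o : Int) := by exact_mod_cast Nat.one_le_iff_ne_zero.mpr hcnt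
      rw [max_eq_right (by omega), max_eq_right (by push_cast; omega)]

-- per-diff scores agree
theorem pv_per_diff (values : List (Int × Int)) (diff : Int) (sample_x : List Int) :
    (PySem.List.max? (sample_x.foldl (fun counts x =>
        counts.insert (pvOut values diff x) (counts.getD (pvOut values diff x) 0 + 1))
        (PySem.Dict.empty : PySem.Dict Int Int)).values (fun v => v)).getD 0 =
    (PySem.List.max? ((PySem.List.sorted (sample_x.map (fun x => pvOut values diff x)) (fun v => v) false).foldl
        (fun (st : Option Int × Int × List Int) o =>
          match st.1 with
          | some q => if o = q then (some q, st.2.1 + 1, st.2.2 ++ [st.2.1 + 1])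
                      else (some o, 1, st.2.2 ++ [(1 : Int)])
          | none => (some o, 1, st.2.2 ++ [(1 : Int)])) (none, 0, [])).2.2 (fun v => v)).getD 0 := by
  have hA : (sample_x.foldl (fun counts x =>
        counts.insert (pvOut values diff x) (counts.getD (pvOut values diff x) 0 + 1))
        (PySem.Dict.empty : PySem.Dict Int Int)) = PySem.Dict.counter (sample_x.map (fun x => pvOut values diff x)) := by
    rw [← PySem.Dict.foldl_insert_getD_add_one_eq_counter, List.foldl_map]
  rw [hA]
  rw [PySem.Dict.values_eq_map_keys _ (PySem.Dict.nodup_keys_counter _) 0, PySem.Dict.keys_counter]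
  rw [List.map_congr_left (fun a _ => PySem.Dict.getD_counter (sample_x.map (fun x => pvOut values diff x)) a)]
  rw [pvMaxD_eq_pvMax0 (by
    intro y hy
    rcases List.mem_map.mp hy with ⟨k, hk, rfl⟩
    have : k ∈ sample_x.map (fun x => pvOut values diff x) := (PySem.Set.mem_ofList _ k).mp hk
    have := List.count_pos_iff.mpr this
    omega)]
  rw [pvFold_runs]
  rw [pvMaxD_eq_pvMax0 pvRunsTop_entries_ge_one]
  rw [pvRunsTop_max _ (PySem.List.sorted_pairwise (sample_x.map (fun x => pvOut values diff x)) (fun v => v))]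
  have hperm := PySem.List.sorted_perm (sample_x.map (fun x => pvOut values diff x)) (fun v => v) false
  have hcnt : ∀ a ∈ PySem.List.sorted (sample_x.map (fun x => pvOut values diff x)) (fun v => v) false,
      (((PySem.List.sorted (sample_x.map (fun x => pvOut values diff x)) (fun v => v) false).count a : Int))
        = (((sample_x.map (fun x => pvOut values diff x)).count a : Int)) := by
    intro a _
    rw [hperm.count_eq]
  rw [List.map_congr_left hcnt]
  exact pvMax0_eq_of_mem_iff (by
    intro y
    simp only [List.mem_map, PySem.Set.mem_ofList, PySem.List.mem_sorted])

theorem pv_foldl_eq (fA fB : Int → Int → Int) (h : ∀ t d, fA t d = fB t d)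
    (l : List Int) (i : Int) : l.foldl fA i = l.foldl fB i := by
  induction l generalizing i with
  | nil => rfl
  | cons d ds ih => simp only [List.foldl_cons, h, ih]

theorem sampled_equal (values : List (Int × Int)) (diffs : List Int) (sample_x : List Int) :
    sampled_diff_score_from_values values diffs sample_x
      = sampled_diff_score_from_values_alt values diffs sample_x := by
  show diffs.foldl (fun total diff =>
      total + (PySem.List.max? (sample_x.foldl (fun counts x =>
        counts.insert (pvOut values diff x) (counts.getD (pvOut values diff x) 0 + 1))
        (PySem.Dict.empty : PySem.Dict Int Int)).values (fun v => v)).getD 0) 0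
    = diffs.foldl (fun total diff =>
      total + (PySem.List.max? ((PySem.List.sorted (sample_x.map (fun x => pvOut values diff x)) (fun v => v) false).foldl
        (fun (st : Option Int × Int × List Int) o =>
          match st.1 with
          | some q => if o = q then (some q, st.2.1 + 1, st.2.2 ++ [st.2.1 + 1])
                      else (some o, 1, st.2.2 ++ [(1 : Int)])
          | none => (some o, 1, st.2.2 ++ [(1 : Int)])) (none, 0, [])).2.2 (fun v => v)).getD 0) 0
  exact pv_foldl_eq _ _ (fun t d => congrArg (HAdd.hAdd t) (pv_per_diff values d sample_x)) diffs 0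

-- ===== VERDICT (by name: the statement is the Claim_ definition above) =====
theorem sampled_diff_score_from_values_spec : Claim_equal_sampled_diff_score_from_values := by
  intro values diffs sample_x _hdom _hpre
  unfold Spec_sampled_diff_score_from_values
  exact sampled_equal values diffs sample_x
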